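-- pv_equiv track=rewrite | github.com/cmghoglund/text_analyzer | functions.py | find_shortest_unique_words
-- ===== SOURCE A (Python) =====
-- def find_shortest_unique_words(words: list):
--     unique_words = {}
--
--     for word in words:
--         # Check if the word is already in the dictionary
--         if word in unique_words:
--             continue
--
--         # If the word is not in the dictionary, add it with its length
--         unique_words[word] = len(word)
--
--     # Get the length of the shortest word(s)
--     shortest_word_length = min(unique_words.values())
--
--     # Get the shortest unique words using a list comprehension
--     shortest_unique_words = [word for word, length in unique_words.items() if length == shortest_word_length]
--
--     return shortest_word_length, shortest_unique_words
-- ===== SOURCE B (Python) =====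
-- def find_shortest_unique_words(words: list):
--     # One streaming pass: dedup with a seen-set while tracking the current
--     # minimum length and the words that attain it, in first-occurrence order.
--     seen = set()
--     shortest_len = None
--     result = []
--     for word in words:
--         if word in seen:
--             continue
--         seen.add(word)
--         n = len(word)
--         if shortest_len is None or n < shortest_len:
--             shortest_len = n
--             result = [word]
--         elif n == shortest_len:
--             result.append(word)
--     return shortest_len, result
-- ===== Notes on version B (the rewrite author's own statement) =====
-- stated objective: alternative
-- what changed: Replaces A's build-a-dict-of-lengths, then min over values, then a filtering comprehension with a single streaming pass maintaining a seen-set, the running minimum length and the words attaining it; Pre_ excludes the empty list, where A raises ValueError (min of an empty sequence) and B returns (None, []), not an int.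
import Mathlib
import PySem

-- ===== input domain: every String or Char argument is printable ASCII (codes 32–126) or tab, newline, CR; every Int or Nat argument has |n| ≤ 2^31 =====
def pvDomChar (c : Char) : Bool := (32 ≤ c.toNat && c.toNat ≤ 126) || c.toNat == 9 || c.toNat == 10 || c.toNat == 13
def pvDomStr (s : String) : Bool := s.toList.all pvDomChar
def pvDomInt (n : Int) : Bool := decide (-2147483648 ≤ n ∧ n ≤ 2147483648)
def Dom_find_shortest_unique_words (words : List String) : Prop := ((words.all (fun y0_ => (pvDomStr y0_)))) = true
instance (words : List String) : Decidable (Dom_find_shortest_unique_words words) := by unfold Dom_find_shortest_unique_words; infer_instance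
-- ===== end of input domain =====

-- B replaces A's dict-then-min-then-filter three-pass structure by a single streaming pass
-- keeping a seen-set, the running minimum length and the words attaining it (alternative decomposition).


-- ===== PORT A =====
def find_shortest_unique_words (words : List String) : Int × List String :=
  let d : PySem.Dict String Int :=
    words.foldl (fun d word =>
      if d.contains word then d
      else d.insert word (PySem.Str.len word)) PySem.Dict.empty
  match PySem.List.min? d.values (fun y => y) with
  | some shortest => (shortest, (d.items.filter (fun p => p.2 == shortest)).map Prod.fst)
  | none => (0, [])   -- min([]) raises ValueError in Python: excluded by Pre_

-- ===== PORT B =====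
def find_shortest_unique_words_alt (words : List String) : Int × List String :=
  let st : PySem.Set String × Option Int × List String :=
    words.foldl (fun st word =>
      if PySem.Set.contains st.1 word then st
      else
        let seen := PySem.Set.add st.1 word
        let n : Int := PySem.Str.len word
        match st.2.1 with
        | none => (seen, some n, [word])
        | some m =>
          if n < m then (seen, some n, [word])
          else if n == m then (seen, st.2.1, st.2.2 ++ [word])
          else (seen, st.2.1, st.2.2)) (PySem.Set.empty, none, [])
  match st.2.1 with
  | some m => (m, st.2.2)
  | none => (0, [])   -- B returns (None, []) in Python, not an Int: excluded by Pre_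

-- ===== PRECONDITION & SPEC =====
-- Pre_ excludes only the empty list, on which A raises ValueError (min of an empty
-- sequence) and B returns (None, []), which is not a value of the declared type.
def Pre_find_shortest_unique_words (words : List String) : Prop := words ≠ []
instance (words : List String) : Decidable (Pre_find_shortest_unique_words words) := by unfold Pre_find_shortest_unique_words; infer_instance
def pvWitness_find_shortest_unique_words : List String := ["bb", "a", "cc", "a"]

def Spec_find_shortest_unique_words (words : List String) (out : Int × List String) : Prop := out = find_shortest_unique_words_alt words
instance (words : List String) (out : Int × List String) : Decidable (Spec_find_shortest_unique_words words out) := by unfold Spec_find_shortest_unique_words; infer_instance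

-- ===== CLAIM (what is proved, stated in full; the proofs are below) =====
def Claim_equal_find_shortest_unique_words : Prop := ∀ (words : List String), Dom_find_shortest_unique_words words → Pre_find_shortest_unique_words words → Spec_find_shortest_unique_words words (find_shortest_unique_words words)

-- ===== LEMMAS AND PROOFS =====

-- A's loop body and B's loop body, named for the proofs.
def stepA (d : PySem.Dict String Int) (word : String) : PySem.Dict String Int :=
  if d.contains word then d else d.insert word (PySem.Str.len word)

def stepB (st : PySem.Set String × Option Int × List String) (word : String) :
    PySem.Set String × Option Int × List String :=
  if PySem.Set.contains st.1 word then st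
  else
    let seen := PySem.Set.add st.1 word
    let n : Int := PySem.Str.len word
    match st.2.1 with
    | none => (seen, some n, [word])
    | some m =>
      if n < m then (seen, some n, [word])
      else if n == m then (seen, st.2.1, st.2.2 ++ [word])
      else (seen, st.2.1, st.2.2)

-- The invariant tying A's dict to B's streaming state.
def InvAB (d : PySem.Dict String Int) (st : PySem.Set String × Option Int × List String) : Prop :=
  st.1 = d.keys ∧ st.2.1 = PySem.List.min? d.values (fun y => y) ∧
  (∀ m, st.2.1 = some m → st.2.2 = (d.items.filter (fun p => p.2 == m)).map Prod.fst)

lemma min?_id_append_singleton (xs : List Int) (n : Int) :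
    PySem.List.min? (xs ++ [n]) (fun y => y) =
      some (match PySem.List.min? xs (fun y => y) with | none => n | some m => min m n) := by
  cases xs with
  | nil => simp [PySem.List.min?]
  | cons x t =>
      rw [List.cons_append, PySem.List.min?_id_cons, PySem.List.min?_id_cons]
      simp [List.foldl_append]

lemma inv_step (d : PySem.Dict String Int) (s : PySem.Set String) (b : Option Int)
    (r : List String) (h : InvAB d (s, b, r)) (w : String) :
    InvAB (stepA d w) (stepB (s, b, r) w) := by
  obtain ⟨hseen, hbest, hres⟩ := h
  simp only at hseen hbest hres
  by_cases hm : w ∈ d.keys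
  · have hc : d.contains w = true := (PySem.Dict.contains_iff_mem_keys d w).mpr hm
    have hsc : PySem.Set.contains s w = true := (PySem.Set.contains_iff s w).mpr (by rw [hseen]; exact hm)
    have h1 : stepA d w = d := by simp only [stepA, hc, if_true]
    have h2 : stepB (s, b, r) w = (s, b, r) := by simp only [stepB, hsc, if_true]
    rw [h1, h2]; exact ⟨hseen, hbest, hres⟩
  · have hc : d.contains w = false := by
      rw [PySem.Dict.contains_eq_decide_mem_keys]; simpa using hm
    have hsc : PySem.Set.contains s w = false := by
      rw [hseen, PySem.Set.contains_eq_listContains]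
      simpa using hm
    have h1 : stepA d w = d.insert w (PySem.Str.len w) := by
      simp only [stepA, hc, Bool.false_eq_true, if_false]
    have hitems : (d.insert w (PySem.Str.len w)).items = d.items ++ [(w, (PySem.Str.len w : Int))] :=
      PySem.Dict.items_insert_of_not_contains d (PySem.Str.len w) hc
    have hkeys : (d.insert w (PySem.Str.len w)).keys = d.keys ++ [w] := by
      simp only [PySem.Dict.keys, hitems, List.map_append, List.map_cons, List.map_nil]
    have hvals : (d.insert w (PySem.Str.len w)).values = d.values ++ [(PySem.Str.len w : Int)] := by
      simp only [PySem.Dict.values, hitems, List.map_append, List.map_cons, List.map_nil]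
    have hadd : PySem.Set.add s w = d.keys ++ [w] := by
      rw [PySem.Set.add_of_not_mem (by rw [hseen]; exact hm), hseen]
    rw [h1]
    cases b with
    | none =>
        have hv : d.values = [] :=
          (PySem.List.min?_eq_none_iff d.values (fun y => y)).mp hbest.symm
        have hi : d.items = [] := by
          have h0 : d.items.map Prod.snd = [] := hv
          simpa using h0
        have h2 : stepB (s, none, r) w =
            (PySem.Set.add s w, some (PySem.Str.len w), [w]) := by
          simp only [stepB, hsc, Bool.false_eq_true, if_false]
        rw [h2]
        refine ⟨hadd ▸ (hkeys.symm), ?_, ?_⟩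
        · show some (PySem.Str.len w) = PySem.List.min? (d.insert w (PySem.Str.len w)).values (fun y => y)
          rw [hvals, hv, min?_id_append_singleton]
          simp [PySem.List.min?]
        · intro m hmv
          simp only [Option.some.injEq] at hmv
          subst hmv
          show [w] = ((d.insert w (PySem.Str.len w)).items.filter (fun p => p.2 == PySem.Str.len w)).map Prod.fst
          rw [hitems, hi]
          simp
    | some m =>
        have hmin : PySem.List.min? d.values (fun y => y) = some m := hbest.symm
        have hisMin : ∀ y ∈ d.values, m ≤ y := fun y hy => PySem.List.min?_isMin hmin y hy
        have hres' := hres m rfl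
        set n : Int := PySem.Str.len w with hn
        by_cases hlt : n < m
        · have h2 : stepB (s, some m, r) w = (PySem.Set.add s w, some n, [w]) := by
            simp only [stepB, hsc, Bool.false_eq_true, if_false, ← hn, hlt, if_true]
          have hfnil : d.items.filter (fun p => p.2 == n) = [] := by
            apply List.filter_eq_nil_iff.mpr
            intro p hp
            have hple : m ≤ p.2 := hisMin p.2 (List.mem_map.mpr ⟨p, hp, rfl⟩)
            simp only [beq_iff_eq]
            intro hpe; omega
          rw [h2]
          refine ⟨hadd ▸ (hkeys.symm), ?_, ?_⟩
          · show some n = PySem.List.min? (d.insert w n).values (fun y => y)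
            rw [hvals, min?_id_append_singleton, hmin]
            simp [min_eq_right (le_of_lt hlt)]
          · intro m' hm'
            simp only [Option.some.injEq] at hm'
            subst hm'
            show [w] = ((d.insert w n).items.filter (fun p => p.2 == n)).map Prod.fst
            rw [hitems, List.filter_append, hfnil]
            simp
        · by_cases heqm : n = m
          · have hbeq : (n == m) = true := by simp [heqm]
            have h2 : stepB (s, some m, r) w = (PySem.Set.add s w, some m, r ++ [w]) := by
              simp only [stepB, hsc, Bool.false_eq_true, if_false, ← hn, hlt, if_false, hbeq,
                if_true]
            rw [h2]
            refine ⟨hadd ▸ (hkeys.symm), ?_, ?_⟩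
            · show some m = PySem.List.min? (d.insert w n).values (fun y => y)
              rw [hvals, min?_id_append_singleton, hmin, heqm]
              simp
            · intro m' hm'
              simp only [Option.some.injEq] at hm'
              subst hm'
              show r ++ [w] = ((d.insert w n).items.filter (fun p => p.2 == m)).map Prod.fst
              rw [hitems, List.filter_append, hres']
              simp [heqm]
          · have hbeq : (n == m) = false := by simp [heqm]
            have h2 : stepB (s, some m, r) w = (PySem.Set.add s w, some m, r) := by
              simp only [stepB, hsc, Bool.false_eq_true, if_false, ← hn, hlt, if_false, hbeq]
            rw [h2]
            refine ⟨hadd ▸ (hkeys.symm), ?_, ?_⟩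
            · show some m = PySem.List.min? (d.insert w n).values (fun y => y)
              rw [hvals, min?_id_append_singleton, hmin]
              have hmn : min m n = m := min_eq_left (by omega)
              simp [hmn]
            · intro m' hm'
              simp only [Option.some.injEq] at hm'
              subst hm'
              show r = ((d.insert w n).items.filter (fun p => p.2 == m)).map Prod.fst
              rw [hitems, List.filter_append, hres']
              simp [hbeq]

lemma inv_foldl (ws : List String) (d : PySem.Dict String Int)
    (st : PySem.Set String × Option Int × List String) (h : InvAB d st) :
    InvAB (ws.foldl stepA d) (ws.foldl stepB st) := by
  induction ws generalizing d st with
  | nil => exact h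
  | cons w t ih => exact ih _ _ (inv_step d st.1 st.2.1 st.2.2 h w)

lemma mem_keys_stepA (d : PySem.Dict String Int) (w v : String) (h : v ∈ d.keys) :
    v ∈ (stepA d w).keys := by
  unfold stepA
  split
  · exact h
  · rw [PySem.Dict.mem_keys_insert]; right; exact h

lemma mem_keys_foldA_mono (ws : List String) (d : PySem.Dict String Int) (v : String)
    (h : v ∈ d.keys) : v ∈ (ws.foldl stepA d).keys := by
  induction ws generalizing d with
  | nil => exact h
  | cons w t ih => exact ih _ (mem_keys_stepA d w v h)

lemma mem_keys_foldA (ws : List String) (d : PySem.Dict String Int) (v : String)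
    (h : v ∈ ws) : v ∈ (ws.foldl stepA d).keys := by
  induction ws generalizing d with
  | nil => cases h
  | cons w t ih =>
      rcases List.mem_cons.mp h with h | h
      · subst h
        refine mem_keys_foldA_mono t (stepA d v) v ?_
        unfold stepA
        split
        · next hc => exact (PySem.Dict.contains_iff_mem_keys d v).mp hc
        · rw [PySem.Dict.mem_keys_insert]; left; rfl
      · exact ih _ h

-- ===== VERDICT (by name: the statement is the Claim_ definition above) =====
theorem find_shortest_unique_words_spec : Claim_equal_find_shortest_unique_words := by
  intro words _hdom hpre
  unfold Spec_find_shortest_unique_words find_shortest_unique_words find_shortest_unique_words_alt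
  have hinv : InvAB (words.foldl stepA PySem.Dict.empty)
      (words.foldl stepB (PySem.Set.empty, none, [])) := by
    apply inv_foldl
    refine ⟨by simp [PySem.Set.empty, PySem.Dict.keys_empty], ?_, ?_⟩
    · simp [PySem.Dict.values, PySem.Dict.empty, PySem.List.min?]
    · intro m hm; simp at hm
  obtain ⟨hseen, hbest, hres⟩ := hinv
  have hA : (fun (d : PySem.Dict String Int) (word : String) =>
      if d.contains word then d else d.insert word (PySem.Str.len word)) = stepA := rfl
  have hB : (fun (st : PySem.Set String × Option Int × List String) (word : String) =>
      if PySem.Set.contains st.1 word then st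
      else
        let seen := PySem.Set.add st.1 word
        let n : Int := PySem.Str.len word
        match st.2.1 with
        | none => (seen, some n, [word])
        | some m =>
          if n < m then (seen, some n, [word])
          else if n == m then (seen, st.2.1, st.2.2 ++ [word])
          else (seen, st.2.1, st.2.2)) = stepB := rfl
  simp only [hA, hB]
  set d := words.foldl stepA PySem.Dict.empty with hd
  -- the dict is nonempty, so min? returns some
  obtain ⟨w, ws, hwords⟩ := List.exists_cons_of_ne_nil hpre
  have hwk : w ∈ d.keys := by
    rw [hd, hwords]; exact mem_keys_foldA _ _ _ (by simp)
  have hvne : d.values ≠ [] := by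
    intro hv
    have hi : d.items = [] := by
      have : d.items.map Prod.snd = [] := hv
      simpa using this
    rw [PySem.Dict.keys, hi] at hwk
    simp at hwk
  cases hmo : PySem.List.min? d.values (fun y => y) with
  | none => exact absurd ((PySem.List.min?_eq_none_iff d.values (fun y => y)).mp hmo) hvne
  | some m =>
      have hb : (words.foldl stepB (PySem.Set.empty, none, [])).2.1 = some m := by
        rw [hbest, hmo]
      rw [hb, hres m hb]
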